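-- pv_equiv track=rewrite | github.com/jad507/HotkeyTagger | hotkey_tagger.py | group_keys_by_tag
-- ===== SOURCE A (Python) =====
-- from typing import Dict, List, Optional
--
-- def group_keys_by_tag(hotkey_map: Dict[str, str]) -> Dict[str, List[str]]:
--     """Invert key->tag to tag->sorted unique list(keys), stable order."""
--     by_tag: Dict[str, List[str]] = {}
--     for k, tag in hotkey_map.items():
--         by_tag.setdefault(tag, []).append(k)
--     for tag in by_tag:
--         # sort case-insensitively, dedupe preserving order
--         seen: List[str] = []
--         for k in sorted(by_tag[tag], key=lambda x: (x.lower(), x)):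
--             if k not in seen:
--                 seen.append(k)
--         by_tag[tag] = seen
--     # sort tags for stable display
--     return dict(sorted(by_tag.items(), key=lambda kv: kv[0].lower()))
-- ===== SOURCE B (Python) =====
-- def group_keys_by_tag(hotkey_map):
--     """Invert key->tag to tag->sorted unique list(keys), stable order."""
--     by_tag = {tag: [] for tag in hotkey_map.values()}
--     for k in sorted(hotkey_map, key=lambda x: (x.lower(), x)):
--         by_tag[hotkey_map[k]].append(k)
--     return dict(sorted(by_tag.items(), key=lambda kv: kv[0].lower()))
-- ===== Notes on version B (the rewrite author's own statement) =====
-- stated objective: simpler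
-- what changed: Instead of sorting and deduplicating each tag's key list separately, B sorts all keys once with the same (lower, key) tuple key and distributes them into pre-seeded per-tag lists in a single pass (dict keys are already unique, so no dedup loop is needed).
import Mathlib
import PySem

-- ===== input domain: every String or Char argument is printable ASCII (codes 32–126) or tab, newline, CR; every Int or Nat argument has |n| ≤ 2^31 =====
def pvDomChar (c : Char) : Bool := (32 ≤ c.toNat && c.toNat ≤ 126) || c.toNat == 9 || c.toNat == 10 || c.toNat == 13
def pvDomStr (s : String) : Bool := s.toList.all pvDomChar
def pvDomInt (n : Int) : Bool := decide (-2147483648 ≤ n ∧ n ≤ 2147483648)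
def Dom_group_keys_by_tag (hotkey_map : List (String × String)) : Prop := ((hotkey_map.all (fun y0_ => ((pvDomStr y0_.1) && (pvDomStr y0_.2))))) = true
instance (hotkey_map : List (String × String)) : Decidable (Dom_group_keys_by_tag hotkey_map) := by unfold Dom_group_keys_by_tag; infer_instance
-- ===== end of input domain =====

-- B replaces A's per-tag sort + dedup loop with one global key sort and a single grouping pass (objective: simpler; return value only).

-- ===== PORT A =====
def group_keys_by_tag (hotkey_map : List (String × String)) : List (String × List String) :=
  -- by_tag.setdefault(tag, []).append(k)  ≡  by_tag[tag] = by_tag.get(tag, []) + [k]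
  let by_tag := hotkey_map.foldl (fun d p => d.modify p.2 [] (fun v => v ++ [p.1])) PySem.Dict.empty
  -- for tag in by_tag: sort case-insensitively, dedupe preserving order
  let by_tag2 := by_tag.keys.foldl
    (fun d tag =>
      d.insert tag
        ((PySem.List.sorted2 (d.getD tag []) (fun x => PySem.Str.lower x) (fun x => x)).foldl
          (fun seen k => if seen.contains k then seen else seen ++ [k]) []))
    by_tag
  -- dict(sorted(by_tag.items(), key=lambda kv: kv[0].lower()))
  (PySem.Dict.ofList (PySem.List.sorted by_tag2.items (fun kv => PySem.Str.lower kv.1))).items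

-- ===== PORT B =====
def group_keys_by_tag_alt (hotkey_map : List (String × String)) : List (String × List String) :=
  -- by_tag = {tag: [] for tag in hotkey_map.values()}
  let by_tag := hotkey_map.foldl (fun d p => d.insert p.2 ([] : List String)) PySem.Dict.empty
  -- for k in sorted(hotkey_map, key=lambda x: (x.lower(), x)): by_tag[hotkey_map[k]].append(k)
  let ks := PySem.List.sorted2 (hotkey_map.map Prod.fst) (fun x => PySem.Str.lower x) (fun x => x)
  let by_tag2 := ks.foldl
    (fun d k => d.modify (((PySem.Dict.mk hotkey_map).get? k).getD "") [] (fun v => v ++ [k])) by_tag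
  -- dict(sorted(by_tag.items(), key=lambda kv: kv[0].lower()))
  (PySem.Dict.ofList (PySem.List.sorted by_tag2.items (fun kv => PySem.Str.lower kv.1))).items

-- ===== PRECONDITION & SPEC =====
-- Pre_ asks the association list to have pairwise-distinct keys: the Python argument is a dict,
-- whose keys are necessarily distinct, so every genuine input satisfies Pre_; duplicate-key lists
-- correspond to no Python input.
def Pre_group_keys_by_tag (hotkey_map : List (String × String)) : Prop :=
  (hotkey_map.map Prod.fst).Nodup
instance (hotkey_map : List (String × String)) : Decidable (Pre_group_keys_by_tag hotkey_map) := by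
  unfold Pre_group_keys_by_tag; infer_instance
def pvWitness_group_keys_by_tag : (List (String × String)) :=
  [("a", "x"), ("B", "x"), ("c", "y")]
def Spec_group_keys_by_tag (hotkey_map : List (String × String)) (out : List (String × List String)) : Prop := out = group_keys_by_tag_alt hotkey_map
instance (hotkey_map : List (String × String)) (out : List (String × List String)) : Decidable (Spec_group_keys_by_tag hotkey_map out) := by unfold Spec_group_keys_by_tag; infer_instance

-- ===== CLAIM (what is proved, stated in full; the proofs are below) =====
def Claim_equal_group_keys_by_tag : Prop := ∀ (hotkey_map : List (String × String)), Dom_group_keys_by_tag hotkey_map → Pre_group_keys_by_tag hotkey_map → Spec_group_keys_by_tag hotkey_map (group_keys_by_tag hotkey_map)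

-- ===== LEMMAS AND PROOFS =====

-- the tuple key (x.lower(), x) both programs sort by, as a lexicographic key
def pvKeyL (x : String) : Lex (String × String) := toLex (PySem.Str.lower x, x)

lemma pvKeyL_injective : Function.Injective pvKeyL := by
  intro a b h
  have := congrArg (fun p => (ofLex p).2) h
  simpa [pvKeyL] using this

-- sorted2 with keys (lower, id) is sorted by the lexicographic key pvKeyL
lemma before_eq (a b : String) :
    (decide (PySem.Str.lower a < PySem.Str.lower b) ||
      (!decide (PySem.Str.lower b < PySem.Str.lower a) && decide (a < b))) =
      decide (pvKeyL a < pvKeyL b) := by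
  rcases lt_trichotomy (PySem.Str.lower a) (PySem.Str.lower b) with h | h | h
  · simp [pvKeyL, Prod.Lex.lt_iff, h]
  · simp [pvKeyL, Prod.Lex.lt_iff, h]
  · simp [pvKeyL, Prod.Lex.lt_iff, h, asymm h, h.ne']

lemma sorted2_eq_sorted_lex (xs : List String) :
    PySem.List.sorted2 xs (fun x => PySem.Str.lower x) (fun x => x) =
      PySem.List.sorted xs pvKeyL := by
  rw [PySem.List.sorted_eq_foldl_insertBy]
  unfold PySem.List.sorted2
  simp only [Bool.false_eq_true, if_false, before_eq]

-- A's dedup loop is set(xs)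
lemma seen_eq_ofList (xs : List String) :
    xs.foldl (fun seen k => if seen.contains k then seen else seen ++ [k]) [] =
      PySem.Set.ofList xs := by
  rw [PySem.Set.ofList_eq_foldl]
  rfl

-- Set.update by already-present elements is a no-op
lemma set_update_of_subset {α : Type} [BEq α] [LawfulBEq α] (s : List α) (xs : List α)
    (h : ∀ x ∈ xs, x ∈ s) : PySem.Set.update s xs = s := by
  induction xs generalizing s with
  | nil => rfl
  | cons x xs ih =>
    have hx : PySem.Set.add s x = s := by
      simp only [PySem.Set.add, PySem.Set.contains]
      rw [if_pos (by simpa using h x (by simp))]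
    calc PySem.Set.update s (x :: xs) = PySem.Set.update (PySem.Set.add s x) xs := rfl
      _ = s := by rw [hx]; exact ih s (fun y hy => h y (by simp [hy]))

-- insert-loop over distinct keys: the final value at t
lemma getD_foldl_insert_getD (G : String → List String → List String) (keys : List String)
    (d : PySem.Dict String (List String)) (hnd : keys.Nodup) (t : String) :
    (keys.foldl (fun d tag => d.insert tag (G tag (d.getD tag []))) d).getD t [] =
      if t ∈ keys then G t (d.getD t []) else d.getD t [] := by
  induction keys generalizing d with
  | nil => simp
  | cons k ks ih =>
    obtain ⟨hk, hks⟩ := List.nodup_cons.mp hnd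
    rw [List.foldl_cons, ih _ hks]
    by_cases htk : t = k
    · subst htk
      simp [hk, PySem.Dict.getD_insert_self]
    · simp [PySem.Dict.getD_insert, htk]

-- a fold of inserts of [] leaves every lookup (default []) at []
lemma getD_foldl_insert_nil (l : List (String × String)) (d : PySem.Dict String (List String))
    (h : ∀ s, d.getD s [] = []) (t : String) :
    (l.foldl (fun d p => d.insert p.2 ([] : List String)) d).getD t [] = [] := by
  induction l generalizing d with
  | nil => exact h t
  | cons p l ih =>
    rw [List.foldl_cons]
    exact ih _ (fun s => by rw [PySem.Dict.getD_insert]; split <;> simp [h])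

-- lookup in the dict view of a nodup association list
lemma tagOf_mem (l : List (String × String)) (hnd : (l.map Prod.fst).Nodup)
    (p : String × String) (hp : p ∈ l) :
    ((PySem.Dict.mk l).get? p.1).getD "" = p.2 := by
  have hmem : (p.1, p.2) ∈ (PySem.Dict.mk l).items := by simpa using hp
  have hk : (PySem.Dict.mk l).keys.Nodup := by simpa [PySem.Dict.keys_mk] using hnd
  rw [PySem.Dict.get?_of_mem_items _ hmem hk]
  rfl

-- CORE: per tag, A's sort+dedup of the tag's keys = the tag's slice of the globally sorted keys
lemma group_eq (l : List (String × String)) (hnd : (l.map Prod.fst).Nodup) (t : String) :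
    PySem.Set.ofList
        (PySem.List.sorted2 ((l.filter (fun p => p.2 == t)).map (fun p => p.1))
          (fun x => PySem.Str.lower x) (fun x => x)) =
      (PySem.List.sorted2 (l.map Prod.fst) (fun x => PySem.Str.lower x) (fun x => x)).filter
        (fun k => ((PySem.Dict.mk l).get? k).getD "" == t) := by
  have hgnd : ((l.filter (fun p => p.2 == t)).map (fun p => p.1)).Nodup :=
    List.Nodup.sublist ((List.filter_sublist (l := l)).map (fun p => p.1)) hnd
  rw [sorted2_eq_sorted_lex, sorted2_eq_sorted_lex]
  have hsg : (PySem.List.sorted ((l.filter (fun p => p.2 == t)).map (fun p => p.1)) pvKeyL).Nodup :=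
    (PySem.List.sorted_perm _ pvKeyL false).nodup_iff.mpr hgnd
  rw [PySem.Set.ofList_eq_self_of_nodup _ hsg]
  have hks_nodup : (PySem.List.sorted (l.map Prod.fst) pvKeyL).Nodup :=
    (PySem.List.sorted_perm _ pvKeyL false).nodup_iff.mpr hnd
  apply PySem.List.sorted_eq_of_perm_of_pairwise_lt
  · -- the filtered sorted key list is a permutation of the tag's group
    have hA : (l.map Prod.fst).filter (fun k => ((PySem.Dict.mk l).get? k).getD "" == t)
        = (l.filter (fun p => p.2 == t)).map (fun p => p.1) := by
      rw [List.filter_map]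
      have : l.filter ((fun k => ((PySem.Dict.mk l).get? k).getD "" == t) ∘ Prod.fst)
          = l.filter (fun p => p.2 == t) :=
        List.filter_congr (fun q hq => by simp [Function.comp, tagOf_mem l hnd q hq])
      rw [this]
    exact hA ▸ ((PySem.List.sorted_perm (l.map Prod.fst) pvKeyL false).filter _)
  · -- strictly increasing under pvKeyL: nodup + pairwise ≤ + injectivity
    have hle := (PySem.List.sorted_pairwise (l.map Prod.fst) pvKeyL).filter
      (fun k => ((PySem.Dict.mk l).get? k).getD "" == t)
    have hne := hks_nodup.filter (fun k => ((PySem.Dict.mk l).get? k).getD "" == t)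
    exact (hle.and hne).imp (fun h =>
      lt_of_le_of_ne h.1 (fun hk => h.2 (pvKeyL_injective hk)))

-- value of A's first grouping fold
lemma getD_groupA (l : List (String × String)) (t : String) :
    (l.foldl (fun d p => d.modify p.2 [] (fun v => v ++ [p.1])) PySem.Dict.empty).getD t [] =
      (l.filter (fun p => p.2 == t)).map (fun p => p.1) := by
  have h1 : l.foldl (fun d p => d.modify p.2 [] (fun v => v ++ [p.1])) PySem.Dict.empty
      = (l.map (fun p => (p.2, p.1))).foldl (fun d q => d.modify q.1 [] (fun v => v ++ [q.2])) PySem.Dict.empty := by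
    rw [List.foldl_map]
  rw [h1, PySem.Dict.getD_foldl_modify_append]
  simp [List.filter_map, Function.comp_def, List.map_map]

-- value of B's grouping fold
lemma getD_groupB (l : List (String × String)) (ks : List String)
    (d : PySem.Dict String (List String)) (h : ∀ s, d.getD s [] = []) (t : String) :
    (ks.foldl (fun d k => d.modify (((PySem.Dict.mk l).get? k).getD "") [] (fun v => v ++ [k])) d).getD t [] =
      ks.filter (fun k => ((PySem.Dict.mk l).get? k).getD "" == t) := by
  have h1 : ks.foldl (fun d k => d.modify (((PySem.Dict.mk l).get? k).getD "") [] (fun v => v ++ [k])) d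
      = (ks.map (fun k => ((((PySem.Dict.mk l).get? k).getD ""), k))).foldl
          (fun d q => d.modify q.1 [] (fun v => v ++ [q.2])) d := by
    rw [List.foldl_map]
  rw [h1, PySem.Dict.getD_foldl_modify_append, h t]
  simp [List.filter_map, Function.comp_def, List.map_map]

-- the items lists of the two dicts fed to the final sort coincide
lemma items_eq (l : List (String × String)) (hnd : (l.map Prod.fst).Nodup) :
    (let by_tag := l.foldl (fun d p => d.modify p.2 [] (fun v => v ++ [p.1])) PySem.Dict.empty
     (by_tag.keys.foldl
        (fun d tag =>
          d.insert tag
            ((PySem.List.sorted2 (d.getD tag []) (fun x => PySem.Str.lower x) (fun x => x)).foldl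
              (fun seen k => if seen.contains k then seen else seen ++ [k]) []))
        by_tag).items) =
    (let by_tag := l.foldl (fun d p => d.insert p.2 ([] : List String)) PySem.Dict.empty
     let ks := PySem.List.sorted2 (l.map Prod.fst) (fun x => PySem.Str.lower x) (fun x => x)
     (ks.foldl
        (fun d k => d.modify (((PySem.Dict.mk l).get? k).getD "") [] (fun v => v ++ [k])) by_tag).items) := by
  simp only []
  -- ===== A side =====
  set d1 := l.foldl (fun d p => d.modify p.2 [] (fun v => v ++ [p.1])) PySem.Dict.empty with hd1
  have hnd1 : d1.keys.Nodup := by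
    rw [hd1]
    exact PySem.Dict.nodup_keys_foldl_modify_key l Prod.snd [] (fun _ p v => v ++ [p.1])
      PySem.Dict.empty (by simp [PySem.Dict.keys_empty])
  have hk1 : d1.keys = PySem.Set.ofList (l.map Prod.snd) := by
    rw [hd1]
    have h := PySem.Dict.keys_foldl_modify_key l Prod.snd [] (fun _ p v => v ++ [p.1]) PySem.Dict.empty
    simpa [PySem.Dict.keys_empty, PySem.Set.update_nil_left] using h
  have hkeys2 : (d1.keys.foldl
      (fun d tag =>
        d.insert tag
          ((PySem.List.sorted2 (d.getD tag []) (fun x => PySem.Str.lower x) (fun x => x)).foldl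
            (fun seen k => if seen.contains k then seen else seen ++ [k]) []))
      d1).keys = d1.keys := by
    rw [PySem.Dict.keys_foldl_insert]
    exact set_update_of_subset _ _ (fun x hx => hx)
  have hnd2 : (d1.keys.foldl
      (fun d tag =>
        d.insert tag
          ((PySem.List.sorted2 (d.getD tag []) (fun x => PySem.Str.lower x) (fun x => x)).foldl
            (fun seen k => if seen.contains k then seen else seen ++ [k]) []))
      d1).keys.Nodup := by
    rw [hkeys2]; exact hnd1
  rw [PySem.Dict.items_eq_map_keys _ hnd2 [], hkeys2]
  -- ===== B side =====
  set d0 := l.foldl (fun d p => d.insert p.2 ([] : List String)) PySem.Dict.empty with hd0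
  have hnd0 : d0.keys.Nodup := by
    rw [hd0]
    exact PySem.Dict.nodup_keys_foldl_insert_key l Prod.snd (fun _ _ => ([] : List String))
      PySem.Dict.empty (by simp [PySem.Dict.keys_empty])
  have hk0 : d0.keys = PySem.Set.ofList (l.map Prod.snd) := by
    rw [hd0]
    have h := PySem.Dict.keys_foldl_insert_key l Prod.snd (fun _ _ => ([] : List String)) PySem.Dict.empty
    simpa [PySem.Dict.keys_empty, PySem.Set.update_nil_left] using h
  have h0nil : ∀ s, d0.getD s [] = [] := by
    intro s
    rw [hd0]
    exact getD_foldl_insert_nil l PySem.Dict.empty (fun _ => by simp [PySem.Dict.getD_empty]) s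
  set ks := PySem.List.sorted2 (l.map Prod.fst) (fun x => PySem.Str.lower x) (fun x => x) with hks
  have hkeysB : (ks.foldl
      (fun d k => d.modify (((PySem.Dict.mk l).get? k).getD "") [] (fun v => v ++ [k])) d0).keys
      = d0.keys := by
    have h := PySem.Dict.keys_foldl_modify_key ks (fun k => ((PySem.Dict.mk l).get? k).getD "")
      [] (fun _ k v => v ++ [k]) d0
    rw [h]
    apply set_update_of_subset
    intro x hx
    obtain ⟨k, hk, rfl⟩ := List.mem_map.mp hx
    have hkmem : k ∈ l.map Prod.fst := by
      have := (PySem.List.sorted2_perm (l.map Prod.fst)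
        (fun x => PySem.Str.lower x) (fun x => x) false).mem_iff.mp (hks ▸ hk)
      exact this
    obtain ⟨q, hq, rfl⟩ := List.mem_map.mp hkmem
    rw [tagOf_mem l hnd q hq, hk0]
    exact (PySem.Set.mem_ofList _ _).mpr (List.mem_map_of_mem hq)
  have hndB : (ks.foldl
      (fun d k => d.modify (((PySem.Dict.mk l).get? k).getD "") [] (fun v => v ++ [k])) d0).keys.Nodup := by
    rw [hkeysB]; exact hnd0
  rw [PySem.Dict.items_eq_map_keys _ hndB [], hkeysB, hk0, hk1]
  -- ===== pointwise equality of the group lists =====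
  apply List.map_congr_left
  intro t ht
  have hA := getD_foldl_insert_getD
    (fun _ v => (PySem.List.sorted2 v (fun x => PySem.Str.lower x) (fun x => x)).foldl
      (fun seen k => if seen.contains k then seen else seen ++ [k]) [])
    d1.keys d1 hnd1 t
  rw [hk1] at hA
  rw [hA, if_pos ht, hd1, getD_groupA, seen_eq_ofList,
    getD_groupB l ks d0 h0nil t, group_eq l hnd t]

-- ===== VERDICT (by name: the statement is the Claim_ definition above) =====
theorem group_keys_by_tag_spec : Claim_equal_group_keys_by_tag := by
  intro l _ hpre
  unfold Spec_group_keys_by_tag group_keys_by_tag group_keys_by_tag_alt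
  have h := items_eq l hpre
  simp only [] at h ⊢
  rw [h]
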